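-- pv_equiv track=rewrite | github.com/pypi-data/pypi-mirror-311 | packages/py-to-bt-mapping/py_to_bt_mapping-1.0.0-py3-none-any.whl/mapping/operations.py | ito_dollar
-- ===== SOURCE A (Python) =====
-- optionbit = 16
--
-- def ito_dollar(val):
--     val = round(val)
--     val_pos = abs(val)
--     oct_str = '{0:o}'.format(val_pos)
--     if len(oct_str) > ((optionbit + 2) // 3):
--         return "Value contains the null string"
--     elif val > 0:
--         return oct_str
--     elif val < 0:
--         int_val = int(oct_str, 8)
--         bin_str = bin(int_val)[2:].zfill(optionbit)
--         inverted_bits = ''.join('1' if bit == '0' else '0' for bit in bin_str)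
--         inverted_int = int(inverted_bits, 2)
--         twos_complement_int = inverted_int + 1
--         twos_complement_octal = oct(twos_complement_int)[2:].zfill((optionbit + 2) // 3)
--         return twos_complement_octal
--     return "0"
-- ===== SOURCE B (Python) =====
-- optionbit = 16
--
-- def ito_dollar(val):
--     val = round(val)
--     val_pos = abs(val)
--     oct_str = oct(val_pos)[2:]
--     if len(oct_str) > ((optionbit + 2) // 3):
--         return "Value contains the null string"
--     elif val > 0:
--         return oct_str
--     elif val < 0:
--         nbits = max(optionbit, val_pos.bit_length())
--         twos = 2 ** nbits - val_pos
--         return oct(twos)[2:].zfill((optionbit + 2) // 3)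
--     return "0"
-- ===== Notes on version B (the rewrite author's own statement) =====
-- stated objective: simpler
-- what changed: The negative branch's bin()/char-inversion/reparse pipeline is replaced by closed-form arithmetic: subtract the magnitude from a power of two spanning max(optionbit, bit_length) bits, then convert once to octal.
import Mathlib
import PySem

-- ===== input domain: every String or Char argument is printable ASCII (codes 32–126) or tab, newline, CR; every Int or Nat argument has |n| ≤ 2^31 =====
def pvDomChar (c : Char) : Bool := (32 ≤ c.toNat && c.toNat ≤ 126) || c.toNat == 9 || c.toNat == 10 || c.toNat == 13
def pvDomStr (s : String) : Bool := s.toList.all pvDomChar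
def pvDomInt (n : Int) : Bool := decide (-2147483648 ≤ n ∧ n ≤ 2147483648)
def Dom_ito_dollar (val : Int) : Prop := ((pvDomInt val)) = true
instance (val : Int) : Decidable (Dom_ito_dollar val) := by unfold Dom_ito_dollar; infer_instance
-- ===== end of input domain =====

-- B replaces A's bin()/invert-each-char/reparse two's-complement pipeline by the closed-form
-- arithmetic 2^max(16, bit_length) - val_pos; objective: simpler.

-- shared digit helpers (both Pythons render numbers in octal the same way)
def digitChar (n : Nat) : Char := Char.ofNat (48 + n)

-- '{0:o}'.format(n) / oct(n)[2:] : octal digits, most significant first ("0" for 0)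
def octDigits (n : Nat) : List Char :=
  if h : n < 8 then [digitChar n]
  else octDigits (n / 8) ++ [digitChar (n % 8)]
  decreasing_by exact Nat.div_lt_self (by omega) (by omega)

-- str.zfill(k) for nonnegative digit strings
def zfill (k : Nat) (s : List Char) : List Char := List.replicate (k - s.length) '0' ++ s

-- ===== PORT A =====
-- bin(n)[2:] : binary digits, most significant first
def binDigits (n : Nat) : List Char :=
  if h : n < 2 then [digitChar n]
  else binDigits (n / 2) ++ [digitChar (n % 2)]
  decreasing_by exact Nat.div_lt_self (by omega) (by omega)

def charVal (c : Char) : Nat := c.toNat - 48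

-- int(s, b) on the digit strings produced above (exact there)
def parseBase (b : Nat) (s : List Char) : Nat := s.foldl (fun a c => a * b + charVal c) 0

-- the generator expression ('1' if bit == '0' else '0' for bit in bin_str), joined
def invertBits (s : List Char) : List Char := s.map (fun c => if c = '0' then '1' else '0')

def ito_dollar (val : Int) : String :=
  -- round(val) on an int is the identity
  let val_pos : Nat := val.natAbs
  let oct_str := octDigits val_pos
  if oct_str.length > (16 + 2) / 3 then "Value contains the null string"
  else if val > 0 then String.mk oct_str
  else if val < 0 then
    let int_val := parseBase 8 oct_str
    let bin_str := zfill 16 (binDigits int_val)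
    let inverted_bits := invertBits bin_str
    let inverted_int := parseBase 2 inverted_bits
    let twos_complement_int := inverted_int + 1
    String.mk (zfill 6 (octDigits twos_complement_int))
  else "0"

-- ===== PORT B =====
-- int.bit_length()
def bitLen (n : Nat) : Nat := if n = 0 then 0 else bitLen (n / 2) + 1
  decreasing_by exact Nat.div_lt_self (by omega) (by omega)

def ito_dollar_alt (val : Int) : String :=
  let val_pos : Nat := val.natAbs
  let oct_str := octDigits val_pos
  if oct_str.length > (16 + 2) / 3 then "Value contains the null string"
  else if val > 0 then String.mk oct_str
  else if val < 0 then
    let nbits := max 16 (bitLen val_pos)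
    -- twos is positive in Python since val_pos < 2^nbits, so Nat subtraction is exact
    let twos := 2 ^ nbits - val_pos
    String.mk (zfill 6 (octDigits twos))
  else "0"

-- ===== PRECONDITION & SPEC =====
def Spec_ito_dollar (val : Int) (out : String) : Prop := out = ito_dollar_alt val
instance (val : Int) (out : String) : Decidable (Spec_ito_dollar val out) := by unfold Spec_ito_dollar; infer_instance

-- ===== CLAIM (what is proved, stated in full; the proofs are below) =====
def Claim_equal_ito_dollar : Prop := ∀ (val : Int), Dom_ito_dollar val → Spec_ito_dollar val (ito_dollar val)

-- ===== LEMMAS AND PROOFS =====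

theorem charVal_digitChar (m : Nat) (h : m < 10) : charVal (digitChar m) = m := by
  unfold charVal digitChar
  rw [Char.toNat_ofNat, if_pos (Or.inl (by omega : 48 + m < 0xD800))]
  omega

theorem parseBase_append_singleton (b : Nat) (xs : List Char) (c : Char) :
    parseBase b (xs ++ [c]) = parseBase b xs * b + charVal c := by
  simp [parseBase, List.foldl_append]

theorem parseOct_octDigits (n : Nat) : parseBase 8 (octDigits n) = n := by
  induction n using Nat.strong_induction_on with
  | _ n ih =>
    rw [octDigits]
    split
    · simp [parseBase, charVal_digitChar n (by omega)]
    · rw [parseBase_append_singleton, ih (n / 8) (Nat.div_lt_self (by omega) (by omega)),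
        charVal_digitChar (n % 8) (by omega)]
      omega

theorem parseBin_binDigits (n : Nat) : parseBase 2 (binDigits n) = n := by
  induction n using Nat.strong_induction_on with
  | _ n ih =>
    rw [binDigits]
    split
    · simp [parseBase, charVal_digitChar n (by omega)]
    · rw [parseBase_append_singleton, ih (n / 2) (Nat.div_lt_self (by omega) (by omega)),
        charVal_digitChar (n % 2) (by omega)]
      omega

-- all characters of binDigits are '0' or '1'
theorem binDigits_binary (n : Nat) : ∀ c ∈ binDigits n, c = '0' ∨ c = '1' := by
  induction n using Nat.strong_induction_on with
  | _ n ih =>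
    rw [binDigits]
    split
    · rename_i h
      intro c hc
      simp at hc
      subst hc
      interval_cases n
      · left; rfl
      · right; rfl
    · intro c hc
      simp at hc
      rcases hc with hc | hc
      · exact ih (n / 2) (Nat.div_lt_self (by omega) (by omega)) c hc
      · subst hc
        rcases Nat.mod_two_eq_zero_or_one n with h | h <;> simp [h]
        · left; rfl
        · right; rfl

theorem binDigits_length (n : Nat) (h : 1 ≤ n) : (binDigits n).length = bitLen n := by
  induction n using Nat.strong_induction_on with
  | _ n ih =>
    rw [binDigits, bitLen]
    split
    · rw [if_neg (by omega)]
      rw [bitLen]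
      simp
      omega
    · rw [if_neg (by omega)]
      simp
      exact ih (n / 2) (Nat.div_lt_self (by omega) (by omega)) (by omega)

theorem lt_two_pow_bitLen (n : Nat) : n < 2 ^ bitLen n := by
  induction n using Nat.strong_induction_on with
  | _ n ih =>
    rw [bitLen]
    split
    · omega
    · have := ih (n / 2) (Nat.div_lt_self (by omega) (by omega))
      rw [pow_succ]
      omega

theorem parseBase_acc (b : Nat) (xs : List Char) (a : Nat) :
    xs.foldl (fun a c => a * b + charVal c) a = a * b ^ xs.length + parseBase b xs := by
  induction xs generalizing a with
  | nil => simp [parseBase]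
  | cons c xs ih =>
    simp only [List.foldl_cons, List.length_cons, parseBase, Nat.zero_mul, Nat.zero_add]
    rw [ih, ih (charVal c), pow_succ]
    ring

theorem parseBase_cons (b : Nat) (c : Char) (xs : List Char) :
    parseBase b (c :: xs) = charVal c * b ^ xs.length + parseBase b xs := by
  simp only [parseBase, List.foldl_cons]
  rw [parseBase_acc]
  simp [parseBase]

theorem invert_sum (xs : List Char) (h : ∀ c ∈ xs, c = '0' ∨ c = '1') :
    parseBase 2 xs + parseBase 2 (invertBits xs) + 1 = 2 ^ xs.length := by
  induction xs with
  | nil => simp [parseBase, invertBits]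
  | cons c xs ih =>
    have hc := h c (by simp)
    have hx := ih (fun d hd => h d (by simp [hd]))
    have c0 : charVal '0' = 0 := by decide
    have c1 : charVal '1' = 1 := by decide
    simp only [invertBits, List.map_cons] at *
    rw [parseBase_cons, parseBase_cons]
    simp only [List.length_map, List.length_cons, pow_succ]
    rcases hc with hc | hc <;> subst hc
    · rw [if_pos rfl, c0, c1]
      omega
    · rw [if_neg (by decide), c0, c1]
      omega

theorem parseBase_zeros_prefix (b k : Nat) (xs : List Char) :
    parseBase b (List.replicate k '0' ++ xs) = parseBase b xs := by
  induction k with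
  | zero => simp
  | succ k ih =>
    simp only [List.replicate_succ, List.cons_append, parseBase, List.foldl_cons]
    have : (0 : Nat) * b + charVal '0' = 0 := by simp [charVal]
    rw [this]
    exact ih

theorem zfill_length (k : Nat) (xs : List Char) :
    (zfill k xs).length = max k xs.length := by
  simp [zfill]
  omega

theorem zfill_binary (k : Nat) (xs : List Char) (h : ∀ c ∈ xs, c = '0' ∨ c = '1') :
    ∀ c ∈ zfill k xs, c = '0' ∨ c = '1' := by
  intro c hc
  simp only [zfill, List.mem_append, List.mem_replicate] at hc
  rcases hc with ⟨_, hc⟩ | hc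
  · left; exact hc
  · exact h c hc

-- the heart of the equivalence: A's invert-and-reparse equals B's power-of-two subtraction
theorem neg_branch_eq (n : Nat) (h : 1 ≤ n) :
    parseBase 2 (invertBits (zfill 16 (binDigits n))) + 1 = 2 ^ max 16 (bitLen n) - n := by
  have hbin := binDigits_binary n
  have hlen : (zfill 16 (binDigits n)).length = max 16 (bitLen n) := by
    rw [zfill_length, binDigits_length n h]
  have hsum := invert_sum (zfill 16 (binDigits n)) (zfill_binary 16 _ hbin)
  have hval : parseBase 2 (zfill 16 (binDigits n)) = n := by
    rw [zfill, parseBase_zeros_prefix, parseBin_binDigits]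
  rw [hlen, hval] at hsum
  have hlt : n < 2 ^ max 16 (bitLen n) := by
    have h1 := lt_two_pow_bitLen n
    have h2 : (2:Nat) ^ bitLen n ≤ 2 ^ max 16 (bitLen n) :=
      Nat.pow_le_pow_right (by omega) (le_max_right _ _)
    omega
  omega

-- ===== VERDICT (by name: the statement is the Claim_ definition above) =====
theorem ito_dollar_spec : Claim_equal_ito_dollar := by
  intro val _
  unfold Spec_ito_dollar ito_dollar ito_dollar_alt
  split_ifs with h1 h2 h3 <;> try rfl
  have hpos : 1 ≤ val.natAbs := by omega
  simp only [parseOct_octDigits, neg_branch_eq val.natAbs hpos]
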